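-- pv_equiv track=rewrite | github.com/bssrdf/pyleet | V/VerbalArithmeticPuzzle.py | isSolvable3
-- ===== SOURCE A (Python) =====
-- from typing import List
--
-- def isSolvable3(words: List[str], result: str) -> bool:
--     for word in words:
--         if len(word) > len(result): # 每個單字的長度都不能長於result的長度
--             return False
--
--     c2i = [-1]*26 #把每個字母映射到數字 (確保每個字母只會映射到同1個數字) 把所有的26個字母的映射初始成-1，代表我們還沒有為此字母分配過數字
--     i2c = [-1]*10 #把每個數字映射到字母 (確保數字不會被重複使用) //把所有10的數字的映射初始成-1,代表我們還沒有分配過此數字給任何字母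
--
--     w = words  # words的全域變數是w
--     r = result # result的全域變數是r
--     for i in range(len(words)): #把所有的單字反轉，以便我們能從個位、十位、百位遍歷到最大位數
--         w[i] = w[i][::-1]
--
--     r = r[::-1] #把結果對應的字串反轉，以便我們能從個位、十位、百位遍歷到最大位數
--
--     def dfs(index, l,  s):
--          #遍歷順序是把當前的位數中的所有單字處理完後，才會進展到下一個位數，直到所有位數被處理完為止
--         # index代表當前到了words中的哪1個單字
--         # (eg. words[index], index從0~words.length()-1)
--         # l代表當前走到了words中單字或result的哪1個位數(因為我們要統計完所有當前位數才能進位)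
--         # (eg. words[index][l], result[l], l從0~result.length()-1或是l從0~words[index].length()-1)
--         # s是所有單字在當前的位數的總合;s%10是當前位數所有單字合的個位數, s/10就是我們傳遞的進位值
--         if l == len(r): #如果已經遍歷完所有的位數，就抵達終止條件
--             return s == 0 #我們要確保當前的s進位值已經是0
--
--         if index == len(w): # 如果對於所有單字words[0]~words[end]，都已經遍歷完當前位數l，就遍歷下個位數
--
--             if c2i[ord(r[l])-ord('A')] != -1: #如果result當中，當前位數對應的字母已經被分配過數字
--                 if c2i[ord(r[l])-ord('A')] == s % 10: #確認此字母映射到的數字是否為s的個位數 (s是所有的單字在當前位數的總合)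
--                     return dfs(0, l+1, s//10) #因為所有單字的當前位數都遍歷完了，所以我們從下個位數的words[0]開始遍歷，並且傳遞進位值(s/10)
--             elif i2c[s%10] == -1:  #如果字母還沒映射過，我們要確認我們該使用的數字(s%10)是否還沒被用過
--                 if l == len(r)-1 and s % 10 == 0: #最大位數不能為0
--                     return False
--                 c2i[ord(r[l])-ord('A')] = s % 10  #把所有單字的當前位數的總和之個位數分配給result的當前位數對應的字母
--                 i2c[s%10] = ord(r[l])-ord('A')  #確保所有單字當前位數的總和對應的個位數字已經被分配給字母r[l]，避免重複分配
--                 temp = dfs(0, l+1, s//10)  #我們先把backtracking的結果存下來，因為此後還要把前面2個操作的結果復原, 而傳遞的index=0代表對於下個位數從words[0]開始遍歷, 把位數l增加1以前進到下個位數,傳遞進位值(s/10)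
--                 c2i[ord(r[l])-ord('A')] = -1  #把前面的操作復原，這是回溯法backtracking的一部份
--                 i2c[s%10] = -1 #把前面的操作復原，這是回溯法backtracking的一部份
--                 return temp #回傳結果
--             return False #如果沒辦法符合以上的if或else if中的條件，代表此路不通，沒辦法形成正確等式
--
--         if l >= len(w[index]):  #如果當前處理的位數已經大於當前單字的長度，就直接跳過此單字
--             return dfs(index+1, l, s) #直接跳過words[index]，從words[index+1]繼續遍歷當前的位數，s不會被改變，因為此單字已經被跳過了
--
--         if c2i[ord(w[index][l])-ord('A')] != -1: #如果此字母已經分配過數字了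
--             if l != len(w[index])-1 or c2i[ord(w[index][l])-ord('A')] != 0: #避免首位數為0
--                 return dfs(index+1, l, s+c2i[ord(w[index][l])-ord('A')]) #把此字母對應的數字加到s，並且從下個單字words[index+1]繼續遍歷
--             return False
--
--         for i in range(10): #如果此字母還沒被分配過任何數字
--
--             if i2c[i] != -1: #如果此數字已經被用過，就不能重複使用
--                 continue
--
--             if i == 0 and len(w[index]) > 1 and l == len(w[index]) - 1: #word[index]的首位數不能是0
--                 continue
--
--             i2c[i] = ord(w[index][l])-ord('A') #我們分配數字i給了字母w[index][l]，因此數字i不能再次被使用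
--             c2i[ord(w[index][l])-ord('A')] = i # 我們把字母w[index][l]映射的值設成數字i，因此該字母不能再被映射成其他數字
--             temp = dfs(index+1, l, s+i)  #我們先把backtracking的結果存下來，因為此後還要把前面2個操作的結果復原。並且從下個單字words[index+1]開始遍歷此位數(此位數被遍歷完才會再進位)，並且把s加上此操作所分配的數字
--             i2c[i] = -1 #把前面的操作復原，這是回溯法backtracking的一部份
--             c2i[ord(w[index][l])-ord('A')] = -1 #把前面的操作復原，這是回溯法backtracking的一部份(讓我們能開始嘗試下一種可能)
--             if temp: #如果任何一種單字分配的方式能形成正確等式，就回傳true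
--                 return True
--         return False #如果所有的數字分配都嘗試過也不能成功，就回傳false
--
--
--     return dfs(0, 0, 0)  # 我們從words[0]的最小位數(個位數)開始遍歷，個位數的總和初始為0
-- ===== SOURCE B (Python) =====
-- from typing import List
--
-- def isSolvable3(words: List[str], result: str) -> bool:
--     # Same search, but iterative: an explicit stack of pending nodes, each
--     # carrying its own (immutable) letter->digit assignment, instead of
--     # recursion over two mutable arrays with undo.  (A also reverses the
--     # elements of `words` in place; B does not mutate its arguments.)
--     for word in words:
--         if len(word) > len(result):
--             return False
--     w = [word[::-1] for word in words]
--     r = result[::-1]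
--     n = len(r)
--     stack = [(0, 0, 0, {})]
--     while stack:
--         index, l, s, assign = stack.pop()
--         if l >= n:
--             if s == 0:
--                 return True
--             continue
--         if index >= len(w):
--             c = r[l]
--             if c in assign:
--                 if assign[c] == s % 10:
--                     stack.append((0, l + 1, s // 10, assign))
--             else:
--                 d = s % 10
--                 if d not in assign.values() and not (l == n - 1 and d == 0):
--                     stack.append((0, l + 1, s // 10, {**assign, c: d}))
--             continue
--         word = w[index]
--         if l >= len(word):
--             stack.append((index + 1, l, s, assign))
--             continue
--         c = word[l]
--         if c in assign:
--             if l != len(word) - 1 or assign[c] != 0: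
--                 stack.append((index + 1, l, s + assign[c], assign))
--             continue
--         for d in range(10):
--             if d in assign.values():
--                 continue
--             if d == 0 and len(word) > 1 and l == len(word) - 1:
--                 continue
--             stack.append((index + 1, l, s + d, {**assign, c: d}))
--     return False
-- ===== Notes on version B (the rewrite author's own statement) =====
-- stated objective: alternative
-- what changed: Replaces the recursive backtracking over two mutable letter/digit arrays with undo by an iterative worklist search: an explicit stack of pending search nodes, each carrying its own immutable letter-to-digit mapping, popped in a loop until a solution or exhaustion.
-- outside the precondition, e.g. on isSolvable3(['Z'], '@'): A returns True, B returns False; on isSolvable3(['a'], 'a'): A raises IndexError, B returns True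
import Mathlib
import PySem

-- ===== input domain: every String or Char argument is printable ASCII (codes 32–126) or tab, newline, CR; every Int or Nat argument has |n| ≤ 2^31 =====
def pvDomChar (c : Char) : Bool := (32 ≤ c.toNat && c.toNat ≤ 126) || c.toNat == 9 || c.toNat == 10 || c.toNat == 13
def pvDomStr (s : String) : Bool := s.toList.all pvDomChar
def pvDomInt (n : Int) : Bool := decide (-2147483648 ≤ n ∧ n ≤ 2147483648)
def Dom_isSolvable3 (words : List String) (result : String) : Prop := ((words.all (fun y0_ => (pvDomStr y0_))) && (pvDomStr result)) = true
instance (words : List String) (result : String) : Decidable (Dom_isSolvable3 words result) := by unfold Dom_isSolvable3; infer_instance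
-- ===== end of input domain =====

-- B replaces A's recursive backtracking over two mutable arrays (with undo) by an iterative
-- explicit-stack search over immutable per-node assignments; same return value on Pre_.
-- NOTE on side effects: Python A reverses each element of `words` in place; B does not mutate
-- its arguments.  The equivalence proved here is about the RETURN value only.

-- ===== PORT A =====
-- Letter cell index ord(c) - ord('A'); Pre_ confines characters to 'A'..'Z', where this Nat
-- subtraction and the direct in-range list reads/writes below are exact (outside Pre_ the Python
-- wraps negative indices or raises IndexError).
def lidxA (c : Char) : Nat := c.toNat - 65

-- dfs(index, l, s) of A, with the two mutable arrays passed through (the Python restores both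
-- arrays after every recursive call, so passing them as values yields the same arrays at every
-- step).  A compares `l == len(r)` / `index == len(w)`; on every reachable state l ≤ len(r) and
-- index ≤ len(w), so the `≥` spelled below is the same test (it makes termination evident).
-- In-range reads r[l], w[index], c2i[..], i2c[..] are `getD` with an unreachable default.
def dfsA : Nat → List (List Char) → List Char → List Int → List Int → Nat → Nat → Int → Bool
  | 0, _, _, _, _, _, _, _ => false   -- fuel exhausted: unreachable for the fuel isSolvable3 passes (proved in mainA)
  | fuel + 1, w, r, c2i, i2c, index, l, s =>
    if l ≥ r.length then s == 0
    else if index ≥ w.length then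
      if c2i.getD (lidxA (r.getD l 'A')) (-1) ≠ -1 then
        if c2i.getD (lidxA (r.getD l 'A')) (-1) = PySem.Int.mod s 10 then
          dfsA fuel w r c2i i2c 0 (l + 1) (PySem.Int.floordiv s 10)
        else false
      else if i2c.getD (PySem.Int.mod s 10).toNat (-1) = -1 then
        if l = r.length - 1 ∧ PySem.Int.mod s 10 = 0 then false
        else
          dfsA fuel w r (c2i.set (lidxA (r.getD l 'A')) (PySem.Int.mod s 10))
            (i2c.set (PySem.Int.mod s 10).toNat (lidxA (r.getD l 'A') : Int)) 0 (l + 1)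
            (PySem.Int.floordiv s 10)
      else false
    else
      if (w.getD index []).length ≤ l then dfsA fuel w r c2i i2c (index + 1) l s
      else
        if c2i.getD (lidxA ((w.getD index []).getD l 'A')) (-1) ≠ -1 then
          if l ≠ (w.getD index []).length - 1 ∨ c2i.getD (lidxA ((w.getD index []).getD l 'A')) (-1) ≠ 0 then
            dfsA fuel w r c2i i2c (index + 1) l (s + c2i.getD (lidxA ((w.getD index []).getD l 'A')) (-1))
          else false
        else
          -- for i in range(10): skip used / leading-zero digits; first successful branch wins
          (List.range 10).any (fun i =>
            if i2c.getD i (-1) ≠ -1 then false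
            else if i = 0 ∧ (w.getD index []).length > 1 ∧ l = (w.getD index []).length - 1 then false
            else dfsA fuel w r (c2i.set (lidxA ((w.getD index []).getD l 'A')) (i : Int))
              (i2c.set i (lidxA ((w.getD index []).getD l 'A') : Int)) (index + 1) l (s + (i : Int)))

def isSolvable3 (words : List String) (result : String) : Bool :=
  if words.any (fun word => word.toList.length > result.toList.length) then false
  else
    -- w[i] = w[i][::-1]; r = result[::-1] (slice ::-1 is reverse); c2i = [-1]*26; i2c = [-1]*10
    -- fuel strictly above the longest chain of dfs calls (column depth × words per column)
    dfsA (result.toList.length * (words.length + 1) + words.length + 1)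
      (words.map (fun word => word.toList.reverse)) result.toList.reverse
      (List.replicate 26 (-1)) (List.replicate 10 (-1)) 0 0 0

-- ===== PORT B =====
-- Size bound on the search tree under a node (l, index); used only as loopB's termination measure.
def szB (rlen wlen l index : Nat) : Nat :=
  if l ≥ rlen then 1
  else if index ≥ wlen then 1 + szB rlen wlen (l + 1) 0
  else 1 + 10 * szB rlen wlen l (index + 1)
termination_by (rlen - l, wlen - index)
decreasing_by all_goals simp_wf <;> omega

-- B's worklist loop: pop a node, either answer it or push its children (each child carries its
-- own immutable dict).  The list is kept top-first: Python's append/pop() at the right end is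
-- cons/head here.  The fuel argument is a structural totality guard; isSolvable3_alt passes
-- szB … + 1, one more than the worklist's total work, proved sufficient in loopB_eq_any.
def loopB : Nat → List (List Char) → List Char → List (Nat × Nat × Int × PySem.Dict Char Int) → Bool
  | 0, _, _, _ => false   -- fuel exhausted: unreachable for the fuel isSolvable3_alt passes
  | fuel + 1, w, r, stack =>
    match stack with
    | [] => false
    | (index, l, s, m) :: rest =>
      if l ≥ r.length then
        if s == 0 then true else loopB fuel w r rest
      else if index ≥ w.length then
        let c := r.getD l 'A'
        match m.get? c with
        | some v =>
          if v = PySem.Int.mod s 10 then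
            loopB fuel w r ((0, l + 1, PySem.Int.floordiv s 10, m) :: rest)
          else loopB fuel w r rest
        | none =>
          let d := PySem.Int.mod s 10
          if d ∉ m.values ∧ ¬(l = r.length - 1 ∧ d = 0) then
            loopB fuel w r ((0, l + 1, PySem.Int.floordiv s 10, m.insert c d) :: rest)
          else loopB fuel w r rest
      else
        let word := w.getD index []
        if word.length ≤ l then loopB fuel w r ((index + 1, l, s, m) :: rest)
        else
          let c := word.getD l 'A'
          match m.get? c with
          | some v =>
            if l ≠ word.length - 1 ∨ v ≠ 0 then loopB fuel w r ((index + 1, l, s + v, m) :: rest)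
            else loopB fuel w r rest
          | none =>
            loopB fuel w r ((List.range 10).foldl (fun st (d : Nat) =>
              if (d : Int) ∈ m.values then st
              else if d = 0 ∧ word.length > 1 ∧ l = word.length - 1 then st
              else (index + 1, l, s + (d : Int), m.insert c (d : Int)) :: st) rest)

def isSolvable3_alt (words : List String) (result : String) : Bool :=
  if words.any (fun word => word.toList.length > result.toList.length) then false
  else
    loopB (szB result.toList.length words.length 0 0 + 1)
      (words.map (fun word => word.toList.reverse)) result.toList.reverse
      [(0, 0, 0, PySem.Dict.empty)]

-- ===== PRECONDITION & SPEC =====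
-- Pre_ excludes inputs that pass A's length check yet contain a character outside 'A'..'Z':
-- there A raises IndexError (characters above 'Z' or below code 39) or silently relies on
-- Python's negative-index wraparound, which conflates e.g. '@' with 'Z' (see the cites).
def Pre_isSolvable3 (words : List String) (result : String) : Prop :=
  (words.any (fun word => word.toList.length > result.toList.length)) = true ∨
  ((words.all (fun word => word.toList.all (fun c => 65 ≤ c.toNat && c.toNat ≤ 90))) = true ∧
   (result.toList.all (fun c => 65 ≤ c.toNat && c.toNat ≤ 90)) = true)
instance (words : List String) (result : String) : Decidable (Pre_isSolvable3 words result) := by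
  unfold Pre_isSolvable3; infer_instance

def pvWitness_isSolvable3 : List String × String := (["AB", "B"], "CB")

def Spec_isSolvable3 (words : List String) (result : String) (out : Bool) : Prop := out = isSolvable3_alt words result
instance (words : List String) (result : String) (out : Bool) : Decidable (Spec_isSolvable3 words result out) := by unfold Spec_isSolvable3; infer_instance

-- ===== CLAIM (what is proved, stated in full; the proofs are below) =====
def Claim_equal_isSolvable3 : Prop := ∀ (words : List String) (result : String), Dom_isSolvable3 words result → Pre_isSolvable3 words result → Spec_isSolvable3 words result (isSolvable3 words result)

-- ===== LEMMAS AND PROOFS =====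

def frameSz (rlen wlen : Nat) (f : Nat × Nat × Int × PySem.Dict Char Int) : Nat :=
  szB rlen wlen f.2.1 f.1

theorem szB_pos (rlen wlen l index : Nat) : 1 ≤ szB rlen wlen l index := by
  rw [szB]; split
  · omega
  · split <;> omega

-- bound on the work pushed by the digit loop: at most one frame of size sz1 per digit
theorem measure_foldl_push (rlen wlen : Nat)
    (step : List (Nat × Nat × Int × PySem.Dict Char Int) → Nat → List (Nat × Nat × Int × PySem.Dict Char Int))
    (sz1 : Nat)
    (hstep : ∀ st d, step st d = st ∨ ∃ f, frameSz rlen wlen f = sz1 ∧ step st d = f :: st) :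
    ∀ (ds : List Nat) (rest : List (Nat × Nat × Int × PySem.Dict Char Int)),
      ((ds.foldl step rest).map (frameSz rlen wlen)).sum ≤
        ds.length * sz1 + (rest.map (frameSz rlen wlen)).sum := by
  intro ds
  induction ds with
  | nil => intro rest; simp
  | cons d ds ih =>
    intro rest
    simp only [List.foldl_cons, List.length_cons]
    rcases hstep rest d with h | ⟨f, hf, h⟩
    · rw [h]; have := ih rest; nlinarith
    · rw [h]
      have := ih (f :: rest)
      simp only [List.map_cons, List.sum_cons] at this ⊢
      rw [hf] at this
      nlinarith

-- proof-only middle layer: A's dfs with the two arrays replaced by the assignment dict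
def dfsM (w : List (List Char)) (r : List Char) (m : PySem.Dict Char Int) (index l : Nat) (s : Int) : Bool :=
  if l ≥ r.length then s == 0
  else if index ≥ w.length then
    match m.get? (r.getD l 'A') with
    | some v =>
      if v = PySem.Int.mod s 10 then dfsM w r m 0 (l + 1) (PySem.Int.floordiv s 10) else false
    | none =>
      if PySem.Int.mod s 10 ∉ m.values ∧ ¬(l = r.length - 1 ∧ PySem.Int.mod s 10 = 0) then
        dfsM w r (m.insert (r.getD l 'A') (PySem.Int.mod s 10)) 0 (l + 1) (PySem.Int.floordiv s 10)
      else false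
  else
    if (w.getD index []).length ≤ l then dfsM w r m (index + 1) l s
    else
      match m.get? ((w.getD index []).getD l 'A') with
      | some v =>
        if l ≠ (w.getD index []).length - 1 ∨ v ≠ 0 then dfsM w r m (index + 1) l (s + v) else false
      | none =>
        (List.range 10).any (fun (d : Nat) =>
          if (d : Int) ∈ m.values then false
          else if d = 0 ∧ (w.getD index []).length > 1 ∧ l = (w.getD index []).length - 1 then false
          else dfsM w r (m.insert ((w.getD index []).getD l 'A') (d : Int)) (index + 1) l (s + (d : Int)))
termination_by (r.length - l, w.length - index)
decreasing_by all_goals simp_wf <;> omega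

-- encodings of the dict as A's two arrays
def CEnc (m : PySem.Dict Char Int) : List Int :=
  (List.range 26).map (fun k => m.getD (Char.ofNat (k + 65)) (-1))
def IEnc (m : PySem.Dict Char Int) : List Int :=
  (List.range 10).map (fun (d : Nat) =>
    match m.items.find? (fun p => p.2 == (d : Int)) with
    | some p => (lidxA p.1 : Int)
    | none => -1)

def GoodM (m : PySem.Dict Char Int) : Prop :=
  (∀ p ∈ m.items, (65 ≤ p.1.toNat ∧ p.1.toNat ≤ 90) ∧ 0 ≤ p.2 ∧ p.2 < 10) ∧
  m.values.Nodup ∧ m.keys.Nodup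

theorem ofNat_lidxA (c : Char) (hc : 65 ≤ c.toNat ∧ c.toNat ≤ 90) :
    Char.ofNat (lidxA c + 65) = c := by
  unfold lidxA; rw [Nat.sub_add_cancel hc.1, Char.ofNat_toNat]

theorem CEnc_read (m : PySem.Dict Char Int) (c : Char) (hc : 65 ≤ c.toNat ∧ c.toNat ≤ 90) :
    (CEnc m).getD (lidxA c) (-1) = (m.get? c).getD (-1) := by
  have hlt : lidxA c < 26 := by unfold lidxA; omega
  unfold CEnc
  rw [PySem.List.getD_map_range _ _ _ _ hlt, ofNat_lidxA c hc, PySem.Dict.getD_eq_get?_getD]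

theorem IEnc_read (m : PySem.Dict Char Int) (k : Nat) (hk : k < 10) :
    (IEnc m).getD k (-1) =
      (match m.items.find? (fun p => p.2 == (k : Int)) with
       | some p => (lidxA p.1 : Int)
       | none => -1) := by
  unfold IEnc
  rw [PySem.List.getD_map_range _ _ _ _ hk]

theorem find?_val_none_iff (m : PySem.Dict Char Int) (d : Int) :
    m.items.find? (fun p => p.2 == d) = none ↔ d ∉ m.values := by
  rw [List.find?_eq_none]
  unfold PySem.Dict.values
  constructor
  · intro h hmem
    rcases List.mem_map.mp hmem with ⟨p, hp, hpv⟩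
    exact h p hp (by simp [hpv])
  · intro h p hp hpv
    exact h (List.mem_map.mpr ⟨p, hp, by simpa using hpv⟩)

theorem CEnc_insert (m : PySem.Dict Char Int) (c : Char) (hc : 65 ≤ c.toNat ∧ c.toNat ≤ 90) (v : Int) :
    CEnc (m.insert c v) = (CEnc m).set (lidxA c) v := by
  have hlt : lidxA c < 26 := by unfold lidxA; omega
  unfold CEnc
  apply List.ext_getElem
  · simp
  intro k hk1 hk2
  have hk : k < 26 := by simpa using hk1
  simp only [List.getElem_set, List.getElem_map, List.getElem_range]
  rw [PySem.Dict.getD_insert]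
  by_cases hkc : lidxA c = k
  · rw [if_pos hkc, if_pos (by rw [← hkc, ofNat_lidxA c hc])]
  · rw [if_neg hkc, if_neg ?_]
    intro hceq
    apply hkc
    have : (Char.ofNat (k + 65)).toNat = k + 65 := by
      rw [Char.toNat_ofNat, if_pos (Or.inl (by omega))]
    rw [← hceq]
    unfold lidxA
    omega

theorem IEnc_insert (m : PySem.Dict Char Int) (c : Char) (dn : Nat)
    (hfresh : ((dn : Int)) ∉ m.values) (hnew : m.get? c = none) :
    IEnc (m.insert c (dn : Int)) = (IEnc m).set dn (lidxA c : Int) := by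
  have hcon : m.contains c = false := by
    rw [PySem.Dict.contains_eq_isSome_get?, hnew]; rfl
  unfold IEnc
  apply List.ext_getElem
  · simp
  intro k hk1 hk2
  have hk : k < 10 := by simpa using hk1
  simp only [List.getElem_set, List.getElem_map, List.getElem_range]
  rw [PySem.Dict.items_insert_of_not_contains _ _ hcon, List.find?_append]
  by_cases hkd : dn = k
  · subst hkd
    rw [(find?_val_none_iff m ((dn : Int))).mpr hfresh]
    simp
  · rw [if_neg hkd]
    have : List.find? (fun p => p.2 == (k : Int)) [(c, (dn : Int))] = none := by
      simp only [List.find?_singleton]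
      rw [if_neg]
      simp only [beq_iff_eq]
      exact fun h => hkd (by exact_mod_cast h)
    rw [this, Option.or_none]

theorem GoodM_insert (m : PySem.Dict Char Int) (c : Char) (dn : Int)
    (hg : GoodM m) (hc : 65 ≤ c.toNat ∧ c.toNat ≤ 90) (hnew : m.get? c = none)
    (hd : 0 ≤ dn ∧ dn < 10) (hfresh : dn ∉ m.values) : GoodM (m.insert c dn) := by
  obtain ⟨h1, h2, h3⟩ := hg
  have hcon : m.contains c = false := by
    rw [PySem.Dict.contains_eq_isSome_get?, hnew]; rfl
  refine ⟨?_, ?_, PySem.Dict.nodup_keys_insert _ _ _ h3⟩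
  · intro p hp
    rw [PySem.Dict.items_insert_of_not_contains _ _ hcon] at hp
    rcases List.mem_append.mp hp with hp | hp
    · exact h1 p hp
    · have : p = (c, dn) := by simpa using hp
      subst this
      exact ⟨hc, hd⟩
  · show ((m.insert c dn).items.map (·.2)).Nodup
    rw [PySem.Dict.items_insert_of_not_contains _ _ hcon, List.map_append]
    rw [List.nodup_append]
    refine ⟨h2, by simp, ?_⟩
    intro a ha b hb
    simp only [List.map_cons, List.map_nil, List.mem_cons, List.not_mem_nil, or_false] at hb
    subst hb
    intro hab
    exact hfresh (by rw [← hab]; exact ha)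

theorem any_congr_mem {α : Type} {l : List α} {p q : α → Bool}
    (h : ∀ a ∈ l, p a = q a) : l.any p = l.any q := by
  induction l with
  | nil => rfl
  | cons a l ih =>
    simp only [List.any_cons, h a (List.mem_cons_self), ih (fun b hb => h b (List.mem_cons_of_mem a hb))]

theorem mainA (w : List (List Char)) (r : List Char)
    (hw : ∀ wd ∈ w, ∀ c ∈ wd, 65 ≤ c.toNat ∧ c.toNat ≤ 90)
    (hr : ∀ c ∈ r, 65 ≤ c.toNat ∧ c.toNat ≤ 90) :
    ∀ (n : Nat) (m : PySem.Dict Char Int) (index l : Nat) (s : Int),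
      (r.length - l) * (w.length + 1) + (w.length - index) < n →
      index ≤ w.length → GoodM m →
      dfsA n w r (CEnc m) (IEnc m) index l s = dfsM w r m index l s := by
  intro n
  induction n with
  | zero =>
    intro m index l s hms hidx hg
    omega
  | succ n ih =>
    intro m index l s hms hidx hg
    rw [dfsA, dfsM.eq_def]
    by_cases hl : l ≥ r.length
    · rw [if_pos hl, if_pos hl]
    rw [if_neg hl, if_neg hl]
    have hl' : l < r.length := by omega
    have hA : (r.length - l) * (w.length + 1)
        = (r.length - (l + 1)) * (w.length + 1) + (w.length + 1) := by
      have h : r.length - l = (r.length - (l + 1)) + 1 := by omega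
      rw [h, Nat.add_mul, one_mul]
    have hmeas : (r.length - (l + 1)) * (w.length + 1) + (w.length - 0) < n := by
      have h2 : (r.length - l) * (w.length + 1) < n + 1 := by omega
      generalize hq : (r.length - (l + 1)) * (w.length + 1) = Q at hA ⊢
      generalize hp : (r.length - l) * (w.length + 1) = P at hA h2
      omega
    by_cases hix : index ≥ w.length
    · -- result-column branch
      rw [if_pos hix, if_pos hix]
      have hcm : r.getD l 'A' ∈ r := by
        rw [List.getD_eq_getElem r 'A' hl']; exact List.getElem_mem _
      have hcup := hr _ hcm
      rw [CEnc_read m _ hcup]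
      have hmn : 0 ≤ PySem.Int.mod s 10 := PySem.Int.mod_nonneg s (by norm_num)
      have hml : PySem.Int.mod s 10 < 10 := PySem.Int.mod_lt s (by norm_num)
      cases hget : m.get? (r.getD l 'A') with
      | some v =>
        dsimp only
        simp only [Option.getD_some]
        have hv := (hg.1 _ (PySem.Dict.mem_items_of_get?_eq_some m hget)).2
        rw [if_pos (show v ≠ -1 by omega)]
        by_cases heq : v = PySem.Int.mod s 10
        · rw [if_pos heq, if_pos heq]
          exact ih m 0 (l + 1) (PySem.Int.floordiv s 10) hmeas (Nat.zero_le _) hg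
        · rw [if_neg heq, if_neg heq]
      | none =>
        dsimp only
        simp only [Option.getD_none]
        rw [if_neg (by simp)]
        have hkt : (PySem.Int.mod s 10).toNat < 10 := by omega
        have hcast : (((PySem.Int.mod s 10).toNat : Nat) : Int) = PySem.Int.mod s 10 :=
          Int.toNat_of_nonneg hmn
        rw [IEnc_read m _ hkt]
        cases hfind : m.items.find? (fun p => p.2 == (((PySem.Int.mod s 10).toNat : Nat) : Int)) with
        | none =>
          dsimp only
          rw [if_pos rfl]
          have hfresh : PySem.Int.mod s 10 ∉ m.values := by
            rw [← hcast]; exact (find?_val_none_iff m _).mp hfind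
          by_cases hz : l = r.length - 1 ∧ PySem.Int.mod s 10 = 0
          · rw [if_pos hz, if_neg (by tauto)]
          · rw [if_neg hz, if_pos ⟨hfresh, hz⟩]
            rw [← CEnc_insert m _ hcup (PySem.Int.mod s 10)]
            rw [← IEnc_insert m _ _ (by rw [hcast]; exact hfresh) hget, hcast]
            exact ih _ 0 (l + 1) (PySem.Int.floordiv s 10) hmeas (Nat.zero_le _)
              (GoodM_insert m _ _ hg hcup hget ⟨hmn, hml⟩ hfresh)
        | some p =>
          dsimp only
          rw [if_neg (show ¬((lidxA p.1 : Int) = -1) from by omega)]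
          have hp2 : p.2 = PySem.Int.mod s 10 := by
            have := List.find?_some hfind
            simp only [beq_iff_eq] at this
            rw [this, hcast]
          have hmem : PySem.Int.mod s 10 ∈ m.values := by
            unfold PySem.Dict.values
            exact List.mem_map.mpr ⟨p, List.mem_of_find?_eq_some hfind, hp2⟩
          rw [if_neg (by tauto)]
    · -- word branch
      rw [if_neg hix, if_neg hix]
      have hix' : index < w.length := by omega
      by_cases hskip : (w.getD index []).length ≤ l
      · rw [if_pos hskip, if_pos hskip]
        exact ih m (index + 1) l s (by omega) (by omega) hg
      · rw [if_neg hskip, if_neg hskip]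
        have hwmem : w.getD index [] ∈ w := by
          rw [List.getD_eq_getElem w [] hix']; exact List.getElem_mem _
        have hcmem : (w.getD index []).getD l 'A' ∈ w.getD index [] := by
          rw [List.getD_eq_getElem _ 'A' (by omega)]; exact List.getElem_mem _
        have hcup := hw _ hwmem _ hcmem
        rw [CEnc_read m _ hcup]
        cases hget : m.get? ((w.getD index []).getD l 'A') with
        | some v =>
          dsimp only
          simp only [Option.getD_some]
          have hv := (hg.1 _ (PySem.Dict.mem_items_of_get?_eq_some m hget)).2
          rw [if_pos (show v ≠ -1 by omega)]
          by_cases hcnd : l ≠ (w.getD index []).length - 1 ∨ v ≠ 0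
          · rw [if_pos hcnd, if_pos hcnd]
            exact ih m (index + 1) l (s + v) (by omega) (by omega) hg
          · rw [if_neg hcnd, if_neg hcnd]
        | none =>
          dsimp only
          simp only [Option.getD_none]
          rw [if_neg (by simp)]
          apply any_congr_mem
          intro i hi
          have hi10 : i < 10 := List.mem_range.mp hi
          rw [IEnc_read m i hi10]
          cases hfind : m.items.find? (fun p => p.2 == ((i : Nat) : Int)) with
          | some p =>
            dsimp only
            rw [if_pos (show (lidxA p.1 : Int) ≠ -1 from by omega)]
            have hp2 : p.2 = (i : Int) := by
              have := List.find?_some hfind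
              simpa using this
            have hmem : (i : Int) ∈ m.values := by
              unfold PySem.Dict.values
              exact List.mem_map.mpr ⟨p, List.mem_of_find?_eq_some hfind, hp2⟩
            rw [if_pos hmem]
          | none =>
            dsimp only
            rw [if_neg (by simp)]
            have hfresh : (i : Int) ∉ m.values := (find?_val_none_iff m _).mp hfind
            rw [if_neg hfresh]
            by_cases hz : i = 0 ∧ (w.getD index []).length > 1 ∧ l = (w.getD index []).length - 1
            · rw [if_pos hz, if_pos hz]
            · rw [if_neg hz, if_neg hz]
              rw [← CEnc_insert m _ hcup (i : Int)]
              rw [← IEnc_insert m _ i hfresh hget]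
              exact ih _ (index + 1) l (s + (i : Int)) (by omega) (by omega)
                (GoodM_insert m _ _ hg hcup hget
                  ⟨Int.natCast_nonneg i, by exact_mod_cast hi10⟩ hfresh)

theorem any_foldl_step {α : Type} (P : α → Bool) (g : Nat → Bool) (mk : Nat → α)
    (step : List α → Nat → List α)
    (hstep : ∀ st d, step st d = if g d then mk d :: st else st) :
    ∀ (ds : List Nat) (rest : List α),
      (ds.foldl step rest).any P = (ds.any (fun d => g d && P (mk d)) || rest.any P) := by
  intro ds
  induction ds with
  | nil => intro rest; simp
  | cons d ds ih =>
    intro rest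
    simp only [List.foldl_cons, List.any_cons, hstep]
    rw [ih]
    by_cases hgd : g d = true
    · simp [hgd, Bool.or_comm, Bool.or_left_comm, Bool.or_assoc]
    · simp only [Bool.not_eq_true] at hgd
      simp [hgd]

theorem loopB_eq_any (w : List (List Char)) (r : List Char) :
    ∀ (fuel : Nat) (stack : List (Nat × Nat × Int × PySem.Dict Char Int)),
      (stack.map (frameSz r.length w.length)).sum < fuel →
      loopB fuel w r stack = stack.any (fun f => dfsM w r f.2.2.2 f.1 f.2.1 f.2.2.1) := by
  intro fuel stack
  induction fuel, w, r, stack using loopB.induct with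
  | case1 => omega
  | case2 fuel w r => intro _; rw [loopB]; rfl
  | case3 fuel w r index l s m rest h1 h2 =>
    intro hfuel
    have hM : dfsM w r m index l s = true := by
      rw [dfsM.eq_def, if_pos h1]; exact h2
    rw [loopB]
    dsimp only
    rw [if_pos h1, if_pos h2, List.any_cons, hM, Bool.true_or]
  | case4 fuel w r index l s m rest h1 h2 ih =>
    intro hfuel
    have hrec : ((rest.map (frameSz r.length w.length)).sum) < fuel := by
      have := szB_pos r.length w.length l index
      simp only [List.map_cons, List.sum_cons, frameSz] at hfuel
      omega
    have hM : dfsM w r m index l s = false := by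
      rw [dfsM.eq_def, if_pos h1]
      simp only [Bool.not_eq_true] at h2
      exact h2
    rw [loopB]
    dsimp only
    rw [if_pos h1, if_neg h2, ih hrec, List.any_cons, hM, Bool.false_or]
  | case5 fuel w r index l s m rest h1 h2 c hv ih =>
    intro hfuel
    have hsz : szB r.length w.length l index = 1 + szB r.length w.length (l + 1) 0 := by
      rw [szB, if_neg (by omega), if_pos (by omega)]
    have hrec : (((0, l + 1, PySem.Int.floordiv s 10, m) :: rest).map
        (frameSz r.length w.length)).sum < fuel := by
      simp only [List.map_cons, List.sum_cons, frameSz] at hfuel ⊢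
      omega
    have hM : dfsM w r m index l s = dfsM w r m 0 (l + 1) (PySem.Int.floordiv s 10) := by
      rw [dfsM.eq_def]
      rw [if_neg h1, if_pos h2, hv]
      dsimp only
      rw [if_pos rfl]
    rw [loopB]
    dsimp only
    rw [if_neg h1, if_pos h2, hv]
    dsimp only
    rw [if_pos rfl, ih hrec, List.any_cons, List.any_cons, hM]
  | case6 fuel w r index l s m rest h1 h2 c v hv hne ih =>
    intro hfuel
    have hrec : ((rest.map (frameSz r.length w.length)).sum) < fuel := by
      have := szB_pos r.length w.length l index
      simp only [List.map_cons, List.sum_cons, frameSz] at hfuel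
      omega
    have hM : dfsM w r m index l s = false := by
      rw [dfsM.eq_def]
      rw [if_neg h1, if_pos h2, hv]
      dsimp only
      rw [if_neg hne]
    rw [loopB]
    dsimp only
    rw [if_neg h1, if_pos h2, hv]
    dsimp only
    rw [if_neg hne, ih hrec, List.any_cons, hM, Bool.false_or]
  | case7 fuel w r index l s m rest h1 h2 c hget d hcond ih =>
    intro hfuel
    have hsz : szB r.length w.length l index = 1 + szB r.length w.length (l + 1) 0 := by
      rw [szB, if_neg (by omega), if_pos (by omega)]
    have hrec : (((0, l + 1, PySem.Int.floordiv s 10,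
        m.insert (r.getD l 'A') (PySem.Int.mod s 10)) :: rest).map
        (frameSz r.length w.length)).sum < fuel := by
      simp only [List.map_cons, List.sum_cons, frameSz] at hfuel ⊢
      omega
    have hM : dfsM w r m index l s
        = dfsM w r (m.insert (r.getD l 'A') (PySem.Int.mod s 10)) 0 (l + 1)
            (PySem.Int.floordiv s 10) := by
      rw [dfsM.eq_def]
      rw [if_neg h1, if_pos h2, hget]
      dsimp only
      rw [if_pos hcond]
    rw [loopB]
    dsimp only
    rw [if_neg h1, if_pos h2, hget]
    dsimp only
    rw [if_pos hcond, ih hrec, List.any_cons, List.any_cons, hM]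
  | case8 fuel w r index l s m rest h1 h2 c hget d hcond ih =>
    intro hfuel
    have hrec : ((rest.map (frameSz r.length w.length)).sum) < fuel := by
      have := szB_pos r.length w.length l index
      simp only [List.map_cons, List.sum_cons, frameSz] at hfuel
      omega
    have hM : dfsM w r m index l s = false := by
      rw [dfsM.eq_def]
      rw [if_neg h1, if_pos h2, hget]
      dsimp only
      rw [if_neg hcond]
    rw [loopB]
    dsimp only
    rw [if_neg h1, if_pos h2, hget]
    dsimp only
    rw [if_neg hcond, ih hrec, List.any_cons, hM, Bool.false_or]
  | case9 fuel w r index l s m rest h1 h2 word hskip ih =>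
    intro hfuel
    have hsz : szB r.length w.length l index = 1 + 10 * szB r.length w.length l (index + 1) := by
      rw [szB, if_neg (by omega), if_neg (by omega)]
    have hrec : (((index + 1, l, s, m) :: rest).map (frameSz r.length w.length)).sum < fuel := by
      simp only [List.map_cons, List.sum_cons, frameSz] at hfuel ⊢
      omega
    have hM : dfsM w r m index l s = dfsM w r m (index + 1) l s := by
      rw [dfsM.eq_def]
      rw [if_neg h1, if_neg h2, if_pos hskip]
    rw [loopB]
    dsimp only
    rw [if_neg h1, if_neg h2, if_pos hskip, ih hrec, List.any_cons, List.any_cons, hM]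
  | case10 fuel w r index l s m rest h1 h2 word hskip c v hv hcond ih =>
    intro hfuel
    have hsz : szB r.length w.length l index = 1 + 10 * szB r.length w.length l (index + 1) := by
      rw [szB, if_neg (by omega), if_neg (by omega)]
    have hrec : (((index + 1, l, s + v, m) :: rest).map (frameSz r.length w.length)).sum < fuel := by
      simp only [List.map_cons, List.sum_cons, frameSz] at hfuel ⊢
      omega
    have hM : dfsM w r m index l s = dfsM w r m (index + 1) l (s + v) := by
      rw [dfsM.eq_def]
      rw [if_neg h1, if_neg h2, if_neg hskip, hv]
      dsimp only
      rw [if_pos hcond]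
    rw [loopB]
    dsimp only
    rw [if_neg h1, if_neg h2, if_neg hskip, hv]
    dsimp only
    rw [if_pos hcond, ih hrec, List.any_cons, List.any_cons, hM]
  | case11 fuel w r index l s m rest h1 h2 word hskip c v hv hcond ih =>
    intro hfuel
    have hrec : ((rest.map (frameSz r.length w.length)).sum) < fuel := by
      have := szB_pos r.length w.length l index
      simp only [List.map_cons, List.sum_cons, frameSz] at hfuel
      omega
    have hM : dfsM w r m index l s = false := by
      rw [dfsM.eq_def]
      rw [if_neg h1, if_neg h2, if_neg hskip, hv]
      dsimp only
      rw [if_neg hcond]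
    rw [loopB]
    dsimp only
    rw [if_neg h1, if_neg h2, if_neg hskip, hv]
    dsimp only
    rw [if_neg hcond, ih hrec, List.any_cons, hM, Bool.false_or]
  | case12 fuel w r index l s m rest h1 h2 word hskip c hget ih =>
    intro hfuel
    have hsz : szB r.length w.length l index = 1 + 10 * szB r.length w.length l (index + 1) := by
      rw [szB, if_neg (by omega), if_neg (by omega)]
    have hpush := measure_foldl_push r.length w.length
      (fun st (d : Nat) =>
        if (d : Int) ∈ m.values then st
        else if d = 0 ∧ (w.getD index []).length > 1 ∧ l = (w.getD index []).length - 1 then st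
        else (index + 1, l, s + (d : Int),
          m.insert ((w.getD index []).getD l 'A') (d : Int)) :: st)
      (szB r.length w.length l (index + 1))
      (by
        intro st d
        dsimp only
        by_cases hc1 : (d : Int) ∈ m.values
        · exact Or.inl (if_pos hc1)
        · by_cases hc2 : d = 0 ∧ (w.getD index []).length > 1 ∧ l = (w.getD index []).length - 1
          · exact Or.inl (by rw [if_neg hc1, if_pos hc2])
          · exact Or.inr ⟨_, rfl, by rw [if_neg hc1, if_neg hc2]⟩)
      (List.range 10) rest
    have hrec : (((List.range 10).foldl (fun st (d : Nat) =>
        if (d : Int) ∈ m.values then st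
        else if d = 0 ∧ (w.getD index []).length > 1 ∧ l = (w.getD index []).length - 1 then st
        else (index + 1, l, s + (d : Int),
          m.insert ((w.getD index []).getD l 'A') (d : Int)) :: st) rest).map
        (frameSz r.length w.length)).sum < fuel := by
      simp only [List.length_range] at hpush
      simp only [List.map_cons, List.sum_cons, frameSz] at hfuel
      omega
    have hM : dfsM w r m index l s
        = (List.range 10).any (fun (d : Nat) =>
            if (d : Int) ∈ m.values then false
            else if d = 0 ∧ (w.getD index []).length > 1 ∧ l = (w.getD index []).length - 1 then
              false
            else
              dfsM w r (m.insert ((w.getD index []).getD l 'A') (d : Int)) (index + 1) l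
                (s + (d : Int))) := by
      rw [dfsM.eq_def]
      rw [if_neg h1, if_neg h2, if_neg hskip, hget]
    rw [loopB]
    dsimp only
    rw [if_neg h1, if_neg h2, if_neg hskip, hget]
    dsimp only
    rw [ih hrec]
    rw [any_foldl_step (fun f => dfsM w r f.2.2.2 f.1 f.2.1 f.2.2.1)
      (fun d => !decide ((d : Int) ∈ m.values) &&
        !decide (d = 0 ∧ (w.getD index []).length > 1 ∧ l = (w.getD index []).length - 1))
      (fun d => (index + 1, l, s + (d : Int), m.insert ((w.getD index []).getD l 'A') (d : Int)))
      _ ?hstep (List.range 10) rest]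
    case hstep =>
      intro st d
      by_cases hc1 : (d : Int) ∈ m.values
      · rw [if_pos hc1, if_neg (by
          simp only [Bool.and_eq_true, Bool.not_eq_true', decide_eq_false_iff_not]
          tauto)]
      · by_cases hc2 : d = 0 ∧ (w.getD index []).length > 1 ∧ l = (w.getD index []).length - 1
        · rw [if_neg hc1, if_pos hc2, if_neg (by
            simp only [Bool.and_eq_true, Bool.not_eq_true', decide_eq_false_iff_not]
            tauto)]
        · rw [if_neg hc1, if_neg hc2, if_pos (by
            simp only [Bool.and_eq_true, Bool.not_eq_true', decide_eq_false_iff_not]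
            tauto)]
    rw [List.any_cons, hM]
    congr 1
    apply List.any_congr rfl
    intro d
    by_cases hc1 : (d : Int) ∈ m.values
    · rw [if_pos hc1]
      have e1 : decide ((d : Int) ∈ m.values) = true := decide_eq_true hc1
      simp only [e1, Bool.not_true, Bool.false_and]
    · by_cases hc2 : d = 0 ∧ (w.getD index []).length > 1 ∧ l = (w.getD index []).length - 1
      · rw [if_neg hc1, if_pos hc2]
        have e2 : decide (d = 0 ∧ (w.getD index []).length > 1 ∧ l = (w.getD index []).length - 1)
          = true := decide_eq_true hc2
        simp only [e2, Bool.not_true, Bool.and_false, Bool.false_and]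
      · rw [if_neg hc1, if_neg hc2]
        have e1 : decide ((d : Int) ∈ m.values) = false := decide_eq_false hc1
        have e2 : decide (d = 0 ∧ (w.getD index []).length > 1 ∧ l = (w.getD index []).length - 1)
          = false := decide_eq_false hc2
        simp only [e1, e2, Bool.not_false, Bool.true_and]

theorem CEnc_empty : CEnc PySem.Dict.empty = List.replicate 26 (-1) := by decide
theorem IEnc_empty : IEnc PySem.Dict.empty = List.replicate 10 (-1) := by decide
theorem GoodM_empty : GoodM PySem.Dict.empty := by
  unfold GoodM
  refine ⟨?_, ?_, ?_⟩ <;> simp [PySem.Dict.empty, PySem.Dict.values, PySem.Dict.keys]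

-- ===== VERDICT (by name: the statement is the Claim_ definition above) =====
theorem isSolvable3_spec : Claim_equal_isSolvable3 := by
  intro words result _hdom hpre
  unfold Spec_isSolvable3 isSolvable3 isSolvable3_alt
  by_cases hlong : (words.any (fun word => word.toList.length > result.toList.length)) = true
  · rw [if_pos hlong, if_pos hlong]
  · rw [if_neg hlong, if_neg hlong]
    rcases hpre with hpre | ⟨hwall, hrall⟩
    · exact absurd hpre hlong
    · simp only [List.all_eq_true, Bool.and_eq_true, decide_eq_true_eq] at hwall hrall
      have hwu : ∀ word ∈ words, ∀ c ∈ word.toList, 65 ≤ c.toNat ∧ c.toNat ≤ 90 := hwall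
      have hru : ∀ c ∈ result.toList, 65 ≤ c.toNat ∧ c.toNat ≤ 90 := hrall
      have hw : ∀ wd ∈ words.map (fun word => word.toList.reverse), ∀ c ∈ wd,
          65 ≤ c.toNat ∧ c.toNat ≤ 90 := by
        intro wd hwd c hc
        rcases List.mem_map.mp hwd with ⟨word, hword, rfl⟩
        exact hwu word hword c (List.mem_reverse.mp hc)
      have hr : ∀ c ∈ result.toList.reverse, 65 ≤ c.toNat ∧ c.toNat ≤ 90 := by
        intro c hc; exact hru c (List.mem_reverse.mp hc)
      rw [← CEnc_empty, ← IEnc_empty,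
        mainA _ _ hw hr _ PySem.Dict.empty 0 0 0 (by
          simp only [List.length_map, List.length_reverse, Nat.sub_zero]
          generalize (result.toList.length * (words.length + 1)) = P
          omega) (Nat.zero_le _) GoodM_empty,
        loopB_eq_any _ _ _ _ (by
          simp only [List.map_cons, List.map_nil, List.sum_cons, List.sum_nil, frameSz,
            List.length_map, List.length_reverse]
          omega)]
      simp
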